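-- pv_equiv track=rewrite | github.com/PhilGru/AoC2019 | day20.py | build_portal_graph
-- ===== SOURCE A (Python) =====
-- from typing import Dict, List, NamedTuple, Union
--
-- class Position(NamedTuple):
--     x: int
--     y: int
--
-- def find_shortest_path(graph, start, end, path=[]):
--     path = path + [start]
--     if start == end:
--         return path
--     if start not in graph.keys():
--         return None
--     shortest = None
--     for node in graph[start]:
--         if node not in path:
--             newpath = find_shortest_path(graph, node, end, path)
--             if newpath:
--                 if not shortest or len(newpath) < len(shortest):
--                     shortest = newpath
--     return shortest
--
-- def build_portal_graph(
--     graph: Dict[Position, List[Position]], portals_oi: Dict[str, Position]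
-- ) -> Dict[str, Dict[str, Union[str, int]]]:
--     portal_graph = {}
--     for start_name, start_position in portals_oi.items():
--         portal_graph[start_name] = {}
--         for end_name, end_position in portals_oi.items():
--             if start_name == end_name:
--                 continue
--             if start_name[:2] == end_name[:2]:
--                 portal_graph[start_name][end_name] = 0
--                 continue
--             path = find_shortest_path(graph, start_position, end_position)
--             if not path is None:
--                 portal_graph[start_name][end_name] = len(path)
--     return portal_graph
-- ===== SOURCE B (Python) =====
-- def _unit_bellman_ford(graph, start):
--     # dist[v] = fewest edges on any walk start -> v (unit weights, relaxation rounds)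
--     dist = {start: 0}
--     rounds = len(graph) + sum(len(ns) for ns in graph.values()) + 1
--     for _ in range(rounds):
--         for u, neighbours in graph.items():
--             if u in dist:
--                 du = dist[u]
--                 for v in neighbours:
--                     if v not in dist or du + 1 < dist[v]:
--                         dist[v] = du + 1
--     return dist
--
--
-- def build_portal_graph(graph, portals_oi):
--     portal_graph = {}
--     for start_name, start_position in portals_oi.items():
--         dist = _unit_bellman_ford(graph, start_position)
--         inner = {}
--         for end_name, end_position in portals_oi.items():
--             if end_name == start_name:
--                 continue
--             if start_name[:2] == end_name[:2]:
--                 inner[end_name] = 0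
--             elif end_position in dist:
--                 inner[end_name] = dist[end_position] + 1
--         portal_graph[start_name] = inner
--     return portal_graph
-- ===== Notes on version B (the rewrite author's own statement) =====
-- stated objective: faster
-- what changed: Replaces A's per-pair DFS enumeration of all simple paths (exponential) by one unit-weight Bellman-Ford relaxation table per source portal, whose distances are reused for every target portal.
import Mathlib
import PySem

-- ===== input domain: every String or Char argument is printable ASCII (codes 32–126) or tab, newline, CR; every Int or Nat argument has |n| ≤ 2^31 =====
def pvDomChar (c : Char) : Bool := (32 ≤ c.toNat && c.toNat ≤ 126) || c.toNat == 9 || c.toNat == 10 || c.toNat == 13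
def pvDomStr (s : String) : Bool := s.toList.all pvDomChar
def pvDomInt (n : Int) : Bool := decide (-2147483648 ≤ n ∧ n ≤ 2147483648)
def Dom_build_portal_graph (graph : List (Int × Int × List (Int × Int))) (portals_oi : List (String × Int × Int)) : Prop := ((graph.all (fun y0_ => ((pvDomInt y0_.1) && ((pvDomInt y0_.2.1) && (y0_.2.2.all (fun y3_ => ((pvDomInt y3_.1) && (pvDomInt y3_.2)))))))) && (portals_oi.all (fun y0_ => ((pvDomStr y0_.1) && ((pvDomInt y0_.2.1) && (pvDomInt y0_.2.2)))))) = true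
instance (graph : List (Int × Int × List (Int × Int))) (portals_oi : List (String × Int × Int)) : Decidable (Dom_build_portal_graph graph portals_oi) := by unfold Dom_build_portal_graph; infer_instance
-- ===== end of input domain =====

-- B replaces A's per-pair exponential DFS over all simple paths by one unit-weight
-- Bellman-Ford relaxation table per source portal (objective: faster).
-- Both dict arguments are ported as association lists under the first-match convention;
-- inner dict builds run over distinct keys (Python dict iteration), so they are ported as appends.

-- ===== PORT A =====

-- first-match lookup: `graph[p]` / `p in graph.keys()` on the graph dict
def glook : List (Int × Int × List (Int × Int)) → Int × Int → Option (List (Int × Int))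
  | [], _ => none
  | (x, y, ns) :: t, p => if (x, y) = p then some ns else glook t p

-- all positions occurring as graph-dict values (used only for the termination measure)
def valsOf (g : List (Int × Int × List (Int × Int))) : List (Int × Int) :=
  g.flatMap (fun e => e.2.2)

lemma glook_sub (g : List (Int × Int × List (Int × Int))) (s : Int × Int)
    (ns : List (Int × Int)) (h : glook g s = some ns) : ∀ x ∈ ns, x ∈ valsOf g := by
  induction g with
  | nil => simp [glook] at h
  | cons e t ih =>
    obtain ⟨x, y, v⟩ := e
    by_cases hxy : ((x, y) : Int × Int) = s
    · simp [glook, hxy] at h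
      subst h
      intro a ha; simp [valsOf]; exact Or.inl ha
    · rw [glook, if_neg hxy] at h
      intro a ha
      simp [valsOf]
      exact Or.inr (by simpa [valsOf] using ih h a ha)

-- termination measure: distinct graph values not yet on the current path
def pmu (g : List (Int × Int × List (Int × Int))) (P : List (Int × Int)) : Nat :=
  ((valsOf g).dedup.filter (fun x => decide (x ∉ P))).length

lemma pmu_lt (g : List (Int × Int × List (Int × Int))) (P : List (Int × Int))
    (v : Int × Int) (hv : v ∈ valsOf g) (hnp : v ∉ P) : pmu g (P ++ [v]) < pmu g P := by
  unfold pmu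
  have hmono : ∀ x, (fun x => decide (x ∉ P ++ [v])) x = true → (fun x => decide (x ∉ P)) x = true := by
    intro x hx
    simp only [decide_eq_true_eq] at *
    intro hc; exact hx (by simp [hc])
  have hsub := List.monotone_filter_right ((valsOf g).dedup) hmono
  have hle := hsub.length_le
  rcases Nat.lt_or_ge (((valsOf g).dedup.filter (fun x => decide (x ∉ P ++ [v]))).length)
      (((valsOf g).dedup.filter (fun x => decide (x ∉ P))).length) with h | h
  · exact h
  · exfalso
    have heq : ((valsOf g).dedup.filter (fun x => decide (x ∉ P ++ [v]))) = ((valsOf g).dedup.filter (fun x => decide (x ∉ P))) :=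
      hsub.eq_of_length (le_antisymm hle h)
    have hvmem : v ∈ (valsOf g).dedup.filter (fun x => decide (x ∉ P)) := by
      simp [List.mem_filter, List.mem_dedup, hv, hnp]
    rw [← heq] at hvmem
    simp [List.mem_filter] at hvmem

-- s[:2] (ASCII slice on the code points)
def take2 (s : String) : List Char := PySem.List.slice s.toList none (some 2)

-- find_shortest_path, transliterated: DFS over all simple paths, keeping a shortest one;
-- fsLoop is the `for node in graph[start]` loop (hsub only carries the termination fact).
mutual
def fs (g : List (Int × Int × List (Int × Int))) (s e : Int × Int)
    (path : List (Int × Int)) : Option (List (Int × Int)) :=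
  if s = e then some (path ++ [s])
  else
    match hg : glook g s with
    | none => none
    | some nbrs => fsLoop g e (path ++ [s]) nbrs none (fun x hx => glook_sub g s nbrs hg x hx)
termination_by (pmu g (path ++ [s]) + 1, 0)
decreasing_by
  exact Prod.Lex.left _ _ (Nat.lt_succ_self _)

def fsLoop (g : List (Int × Int × List (Int × Int))) (e : Int × Int)
    (P2 : List (Int × Int)) (vs : List (Int × Int)) (shortest : Option (List (Int × Int)))
    (hsub : ∀ x ∈ vs, x ∈ valsOf g) : Option (List (Int × Int)) :=
  match vs with
  | [] => shortest
  | v :: rest =>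
    if hv : v ∈ P2 then fsLoop g e P2 rest shortest (fun x hx => hsub x (List.mem_cons_of_mem v hx))
    else
      let shortest' :=
        match fs g v e P2 with
        | none => shortest
        | some newpath =>
          match shortest with
          | none => some newpath
          | some sp => if newpath.length < sp.length then some newpath else some sp
      fsLoop g e P2 rest shortest' (fun x hx => hsub x (List.mem_cons_of_mem v hx))
termination_by (pmu g P2, vs.length + 1)
decreasing_by
  · exact Prod.Lex.right _ (by simp [List.length_cons])
  · have hlt : pmu g (P2 ++ [v]) < pmu g P2 := pmu_lt g P2 v (hsub v (List.mem_cons_self)) hv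
    rcases Nat.lt_or_ge (pmu g (P2 ++ [v]) + 1) (pmu g P2) with h | h
    · exact Prod.Lex.left _ _ h
    · have : pmu g (P2 ++ [v]) + 1 = pmu g P2 := le_antisymm hlt h
      rw [this]
      exact Prod.Lex.right _ (by omega)
  · exact Prod.Lex.right _ (by simp [List.length_cons])
end

def build_portal_graph (graph : List (Int × Int × List (Int × Int))) (portals_oi : List (String × Int × Int)) : List (String × List (String × Int)) :=
  portals_oi.foldl (fun pg sp =>
    let inner := portals_oi.foldl (fun inner ep =>
      if sp.1 = ep.1 then inner
      else if take2 sp.1 = take2 ep.1 then inner ++ [(ep.1, (0 : Int))]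
      else
        match fs graph (sp.2.1, sp.2.2) (ep.2.1, ep.2.2) [] with
        | none => inner
        | some p => inner ++ [(ep.1, (p.length : Int))]) []
    pg ++ [(sp.1, inner)]) []

-- ===== PORT B =====

-- first-match lookup / in-place value update on the distance dict
def dlook : List ((Int × Int) × Int) → (Int × Int) → Option Int
  | [], _ => none
  | (k, w) :: t, v => if k = v then some w else dlook t v

def dset : List ((Int × Int) × Int) → (Int × Int) → Int → List ((Int × Int) × Int)
  | [], _, _ => []
  | (k, w) :: t, v, x => if k = v then (k, x) :: t else (k, w) :: dset t v x

-- `if v not in dist or du + 1 < dist[v]: dist[v] = du + 1`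
def relax (dist : List ((Int × Int) × Int)) (du : Int) (v : Int × Int) : List ((Int × Int) × Int) :=
  match dlook dist v with
  | none => dist ++ [(v, du + 1)]
  | some dv => if du + 1 < dv then dset dist v (du + 1) else dist

-- `if u in dist: du = dist[u]; for v in neighbours: …`
def entryFold (dist : List ((Int × Int) × Int)) (u : Int × Int) (nbrs : List (Int × Int)) : List ((Int × Int) × Int) :=
  match dlook dist u with
  | none => dist
  | some du => nbrs.foldl (fun d v => relax d du v) dist

-- graph.items(): each key once (first occurrence, first-match value), insertion order
def gitems : List (Int × Int × List (Int × Int)) → List ((Int × Int) × List (Int × Int)) → List ((Int × Int) × List (Int × Int))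
  | [], acc => acc
  | ent :: t, acc =>
    if acc.any (fun p => p.1 = (ent.1, ent.2.1)) then gitems t acc
    else gitems t (acc ++ [((ent.1, ent.2.1), ent.2.2)])

-- one relaxation round: `for u, neighbours in graph.items(): …`
def bfRound (g : List (Int × Int × List (Int × Int))) (dist : List ((Int × Int) × Int)) : List ((Int × Int) × Int) :=
  (gitems g []).foldl (fun d p => entryFold d p.1 p.2) dist

-- `for _ in range(n): …`
def bfIter (g : List (Int × Int × List (Int × Int))) : Nat → List ((Int × Int) × Int) → List ((Int × Int) × Int)
  | 0, dist => dist
  | n + 1, dist => bfIter g n (bfRound g dist)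

-- _unit_bellman_ford
def bf (g : List (Int × Int × List (Int × Int))) (start : Int × Int) : List ((Int × Int) × Int) :=
  bfIter g ((gitems g []).length + ((gitems g []).map (fun p => p.2.length)).sum + 1) [(start, 0)]

def build_portal_graph_alt (graph : List (Int × Int × List (Int × Int))) (portals_oi : List (String × Int × Int)) : List (String × List (String × Int)) :=
  portals_oi.foldl (fun pg sp =>
    let dist := bf graph (sp.2.1, sp.2.2)
    let inner := portals_oi.foldl (fun inner ep =>
      if ep.1 = sp.1 then inner
      else if take2 sp.1 = take2 ep.1 then inner ++ [(ep.1, (0 : Int))]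
      else
        match dlook dist (ep.2.1, ep.2.2) with
        | none => inner
        | some m => inner ++ [(ep.1, m + 1)]) []
    pg ++ [(sp.1, inner)]) []

-- ===== PRECONDITION & SPEC =====
def Spec_build_portal_graph (graph : List (Int × Int × List (Int × Int))) (portals_oi : List (String × Int × Int)) (out : List (String × List (String × Int))) : Prop := out = build_portal_graph_alt graph portals_oi
instance (graph : List (Int × Int × List (Int × Int))) (portals_oi : List (String × Int × Int)) (out : List (String × List (String × Int))) : Decidable (Spec_build_portal_graph graph portals_oi out) := by unfold Spec_build_portal_graph; infer_instance

-- ===== CLAIM (what is proved, stated in full; the proofs are below) =====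
def Claim_equal_build_portal_graph : Prop := ∀ (graph : List (Int × Int × List (Int × Int))) (portals_oi : List (String × Int × Int)), Dom_build_portal_graph graph portals_oi → Spec_build_portal_graph graph portals_oi (build_portal_graph graph portals_oi)

-- ===== LEMMAS AND PROOFS =====

/-! Walks in the graph (first-match adjacency), the common semantic reference. -/

def adjD (g : List (Int × Int × List (Int × Int))) (u : Int × Int) : List (Int × Int) :=
  (glook g u).getD []

inductive W (g : List (Int × Int × List (Int × Int))) : (Int × Int) → (Int × Int) → List (Int × Int) → Prop
  | nil (e : Int × Int) : W g e e []
  | cons {u v e : Int × Int} {l : List (Int × Int)} (h : v ∈ adjD g u) (hw : W g v e l) :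
      W g u e (v :: l)

lemma W_nil_inv {g : List (Int × Int × List (Int × Int))} {s v : Int × Int}
    (h : W g s v []) : s = v := by cases h; rfl

lemma W_cons_inv {g : List (Int × Int × List (Int × Int))} {s e v : Int × Int}
    {t : List (Int × Int)} (h : W g s e (v :: t)) : v ∈ adjD g s ∧ W g v e t := by
  cases h with | cons h hw => exact ⟨h, hw⟩

lemma W_append {g : List (Int × Int × List (Int × Int))} {s u e : Int × Int}
    {l1 l2 : List (Int × Int)} (h1 : W g s u l1) (h2 : W g u e l2) : W g s e (l1 ++ l2) := by
  induction h1 with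
  | nil => simpa using h2
  | cons h hw ih => exact W.cons h (ih h2)

lemma W_split {g : List (Int × Int × List (Int × Int))} {e : Int × Int} :
    ∀ (l1 l2 : List (Int × Int)) (s : Int × Int), W g s e (l1 ++ l2) →
      ∃ u, W g s u l1 ∧ W g u e l2 := by
  intro l1
  induction l1 with
  | nil => intro l2 s h; exact ⟨s, W.nil s, by simpa using h⟩
  | cons v t ih =>
    intro l2 s h
    obtain ⟨hadj, hw⟩ := W_cons_inv (by simpa using h)
    obtain ⟨u, h1, h2⟩ := ih l2 v hw
    exact ⟨u, W.cons hadj h1, h2⟩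

lemma W_last' {g : List (Int × Int × List (Int × Int))} {s e x : Int × Int}
    {l0 : List (Int × Int)} (h : W g s e (l0 ++ [x])) : x = e := by
  obtain ⟨u, _, h2⟩ := W_split l0 [x] s h
  obtain ⟨_, h3⟩ := W_cons_inv h2
  exact W_nil_inv h3

/-! The dict view `gitems` agrees with first-match lookup. -/

lemma gitems_mem :
    ∀ (G : List (Int × Int × List (Int × Int))) (acc : List ((Int × Int) × List (Int × Int)))
      (u : Int × Int) (ns : List (Int × Int)),
      (u, ns) ∈ gitems G acc ↔
        (u, ns) ∈ acc ∨ ((∀ p ∈ acc, p.1 ≠ u) ∧ glook G u = some ns) := by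
  intro G
  induction G with
  | nil => intro acc u ns; simp [gitems, glook]
  | cons ent t ih =>
    intro acc u ns
    obtain ⟨x, y, ns0⟩ := ent
    by_cases hany : acc.any (fun p => p.1 = ((x, y) : Int × Int))
    · rw [gitems, if_pos hany, ih]
      rw [List.any_eq_true] at hany
      obtain ⟨p0, hp0, hp0k⟩ := hany
      simp only [decide_eq_true_eq] at hp0k
      by_cases hu : ((x, y) : Int × Int) = u
      · subst hu
        simp only [glook, if_pos rfl]
        constructor
        · rintro (h | ⟨hfresh, _⟩)
          · exact Or.inl h
          · exact absurd hp0k (hfresh p0 hp0)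
        · rintro (h | ⟨hfresh, _⟩)
          · exact Or.inl h
          · exact absurd hp0k (hfresh p0 hp0)
      · simp only [glook, if_neg hu]
    · rw [gitems, if_neg hany, ih]
      have hany' : ∀ p ∈ acc, p.1 ≠ ((x, y) : Int × Int) := by
        intro p hp hpk
        exact hany (List.any_eq_true.mpr ⟨p, hp, by simp [hpk]⟩)
      by_cases hu : ((x, y) : Int × Int) = u
      · subst hu
        simp only [glook, if_pos rfl]
        constructor
        · rintro (h | ⟨hfresh, hg⟩)
          · rw [List.mem_append] at h
            rcases h with h | h
            · exact Or.inl h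
            · simp at h
              exact Or.inr ⟨hany', by simp [glook, h]⟩
          · exact absurd rfl (hfresh ((x, y), ns0) (by simp))
        · rintro (h | ⟨hfresh, hg⟩)
          · exact Or.inl (by simp [h])
          · have : ns = ns0 := by simpa using hg.symm
            subst this
            exact Or.inl (by simp)
      · simp only [glook, if_neg hu]
        constructor
        · rintro (h | ⟨hfresh, hg⟩)
          · rw [List.mem_append] at h
            rcases h with h | h
            · exact Or.inl h
            · simp at h
              exact absurd h.1 (Ne.symm (by exact fun hh => hu (by simp [hh])))
          · refine Or.inr ⟨fun p hp => hfresh p (by simp [hp]), hg⟩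
        · rintro (h | ⟨hfresh, hg⟩)
          · exact Or.inl (by simp [h])
          · refine Or.inr ⟨?_, hg⟩
            intro p hp
            rw [List.mem_append] at hp
            rcases hp with hp | hp
            · exact hfresh p hp
            · simp at hp
              subst hp
              exact hu

lemma gitems_glook {g : List (Int × Int × List (Int × Int))} {u : Int × Int}
    {ns : List (Int × Int)} :
    (u, ns) ∈ gitems g [] ↔ glook g u = some ns := by
  rw [gitems_mem]; simp

def flatVals (g : List (Int × Int × List (Int × Int))) : List (Int × Int) :=
  (gitems g []).flatMap (fun p => p.2)

lemma adjD_flat {g : List (Int × Int × List (Int × Int))} {u v : Int × Int}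
    (h : v ∈ adjD g u) : v ∈ flatVals g := by
  unfold adjD at h
  cases hg : glook g u with
  | none => rw [hg] at h; simp at h
  | some ns =>
    rw [hg] at h
    simp only [Option.getD_some] at h
    exact List.mem_flatMap.mpr ⟨(u, ns), gitems_glook.mpr hg, h⟩

lemma W_mem_flat {g : List (Int × Int × List (Int × Int))} {s e : Int × Int}
    {l : List (Int × Int)} (h : W g s e l) : ∀ x ∈ l, x ∈ flatVals g := by
  induction h with
  | nil => simp
  | cons hadj hw ih =>
    intro x hx
    rcases List.mem_cons.mp hx with hx | hx
    · subst hx; exact adjD_flat hadj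
    · exact ih x hx

/-- Cycle cutting: every walk contains a duplicate-free walk between the same endpoints. -/
lemma W_cut {g : List (Int × Int × List (Int × Int))} {e : Int × Int} :
    ∀ (n : Nat) (l : List (Int × Int)), l.length ≤ n → ∀ s, W g s e l →
      ∃ l', W g s e l' ∧ (s :: l').Nodup ∧ l'.length ≤ l.length ∧ ∀ x ∈ l', x ∈ l := by
  intro n
  induction n with
  | zero =>
    intro l hlen s hw
    have : l = [] := List.eq_nil_of_length_eq_zero (Nat.le_zero.mp hlen)
    subst this
    exact ⟨[], hw, by simp, le_refl _, by simp⟩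
  | succ n ih =>
    intro l hlen s hw
    cases hw with
    | nil => exact ⟨[], W.nil _, by simp, le_refl _, by simp⟩
    | @cons _ v _ t hadj hwt =>
      have htlen : t.length ≤ n := by simpa using Nat.lt_succ_iff.mp (Nat.lt_of_lt_of_le (by simp) hlen)
      obtain ⟨t', hwt', hnd', hlen', hsub'⟩ := ih t htlen v hwt
      by_cases hs : s ∈ v :: t'
      · have hwfull : W g s e (v :: t') := W.cons hadj hwt'
        obtain ⟨a, b, hab⟩ := List.append_of_mem hs
        rw [hab] at hwfull
        obtain ⟨u, _, hub⟩ := W_split a (s :: b) s hwfull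
        obtain ⟨_, hsb⟩ := W_cons_inv hub
        have hblen : b.length ≤ n := by
          have h1 : (v :: t').length = a.length + 1 + b.length := by
            rw [hab]; simp; omega
          have h2 : t'.length ≤ t.length := hlen'
          simp at h1
          omega
        obtain ⟨b', hwb', hndb', hlenb', hsubb'⟩ := ih b hblen s hsb
        refine ⟨b', hwb', hndb', ?_, ?_⟩
        · have h1 : (v :: t').length = a.length + 1 + b.length := by rw [hab]; simp; omega
          simp at h1
          have : b.length ≤ t.length := by omega
          calc b'.length ≤ b.length := hlenb'
            _ ≤ t.length := this
            _ ≤ (v :: t).length := by simp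
        · intro x hx
          have hxb : x ∈ b := hsubb' x hx
          have : x ∈ v :: t' := by rw [hab]; simp [hxb]
          rcases List.mem_cons.mp this with h | h
          · simp [h]
          · exact List.mem_cons_of_mem v (hsub' x h)
      · refine ⟨v :: t', W.cons hadj hwt', ?_, by simpa using hlen', ?_⟩
        · exact List.nodup_cons.mpr ⟨hs, hnd'⟩
        · intro x hx
          rcases List.mem_cons.mp hx with h | h
          · simp [h]
          · exact List.mem_cons_of_mem v (hsub' x h)


/-! B-side: lookup/update lemmas for the distance table. -/

lemma dlook_append_some {d : List ((Int × Int) × Int)} {y : Int × Int} {w : Int}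
    (h : dlook d y = some w) (r : List ((Int × Int) × Int)) : dlook (d ++ r) y = some w := by
  induction d with
  | nil => simp [dlook] at h
  | cons p t ih =>
    obtain ⟨k, x⟩ := p
    by_cases hk : k = y
    · simp [dlook, hk] at h ⊢; exact h
    · rw [dlook, if_neg hk] at h
      rw [List.cons_append, dlook, if_neg hk]
      exact ih h

lemma dlook_append_none {d : List ((Int × Int) × Int)} {y : Int × Int}
    (h : dlook d y = none) (r : List ((Int × Int) × Int)) : dlook (d ++ r) y = dlook r y := by
  induction d with
  | nil => simp
  | cons p t ih =>
    obtain ⟨k, x⟩ := p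
    by_cases hk : k = y
    · simp [dlook, hk] at h
    · rw [dlook, if_neg hk] at h
      rw [List.cons_append, dlook, if_neg hk]
      exact ih h

lemma dlook_dset_ne {d : List ((Int × Int) × Int)} {y k : Int × Int} {x : Int}
    (h : y ≠ k) : dlook (dset d k x) y = dlook d y := by
  induction d with
  | nil => simp [dset]
  | cons p t ih =>
    obtain ⟨k0, w0⟩ := p
    by_cases hk : k0 = k
    · subst hk
      rw [dset, if_pos rfl, dlook, dlook, if_neg (fun hh => h hh.symm), if_neg (fun hh => h hh.symm)]
    · rw [dset, if_neg hk]
      by_cases hy : k0 = y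
      · simp [dlook, hy]
      · rw [dlook, if_neg hy, dlook, if_neg hy]
        exact ih

lemma dlook_dset_self {d : List ((Int × Int) × Int)} {k : Int × Int} {x w : Int}
    (h : dlook d k = some w) : dlook (dset d k x) k = some x := by
  induction d with
  | nil => simp [dlook] at h
  | cons p t ih =>
    obtain ⟨k0, w0⟩ := p
    by_cases hk : k0 = k
    · rw [dset, if_pos hk, dlook, if_pos hk]
    · rw [dset, if_neg hk, dlook, if_neg hk]
      rw [dlook, if_neg hk] at h
      exact ih h

/-- Values present in the table never disappear and never increase. -/
def DLe (d d' : List ((Int × Int) × Int)) : Prop :=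
  ∀ k w, dlook d k = some w → ∃ w', dlook d' k = some w' ∧ w' ≤ w

lemma DLe_refl (d : List ((Int × Int) × Int)) : DLe d d :=
  fun k w h => ⟨w, h, le_refl w⟩

lemma DLe_trans {a b c : List ((Int × Int) × Int)} (h1 : DLe a b) (h2 : DLe b c) : DLe a c := by
  intro k w h
  obtain ⟨w1, hw1, le1⟩ := h1 k w h
  obtain ⟨w2, hw2, le2⟩ := h2 k w1 hw1
  exact ⟨w2, hw2, le_trans le2 le1⟩

lemma DLe_relax (d : List ((Int × Int) × Int)) (du : Int) (v : Int × Int) :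
    DLe d (relax d du v) := by
  intro k w h
  unfold relax
  cases hv : dlook d v with
  | none => exact ⟨w, dlook_append_some h _, le_refl w⟩
  | some dv =>
    dsimp only
    by_cases hlt : du + 1 < dv
    · rw [if_pos hlt]
      by_cases hk : k = v
      · subst hk
        rw [h] at hv
        obtain rfl : w = dv := by injection hv
        exact ⟨du + 1, dlook_dset_self h, le_of_lt hlt⟩
      · exact ⟨w, by rw [dlook_dset_ne hk]; exact h, le_refl w⟩
    · rw [if_neg hlt]
      exact ⟨w, h, le_refl w⟩

lemma DLe_foldl {α : Type} {f : List ((Int × Int) × Int) → α → List ((Int × Int) × Int)}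
    (hf : ∀ d a, DLe d (f d a)) :
    ∀ (l : List α) (d : List ((Int × Int) × Int)), DLe d (l.foldl f d) := by
  intro l
  induction l with
  | nil => intro d; exact DLe_refl d
  | cons a t ih =>
    intro d
    rw [List.foldl_cons]
    exact DLe_trans (hf d a) (ih (f d a))

lemma DLe_entry (d : List ((Int × Int) × Int)) (u : Int × Int) (ns : List (Int × Int)) :
    DLe d (entryFold d u ns) := by
  unfold entryFold
  cases dlook d u with
  | none => exact DLe_refl d
  | some du => exact DLe_foldl (fun d v => DLe_relax d du v) ns d

lemma DLe_round (g : List (Int × Int × List (Int × Int))) (d : List ((Int × Int) × Int)) :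
    DLe d (bfRound g d) := by
  unfold bfRound
  exact DLe_foldl (fun d p => DLe_entry d p.1 p.2) (gitems g []) d

/-! Lower invariant: every table value is the length of some walk. -/

def Lo (g : List (Int × Int × List (Int × Int))) (s : Int × Int)
    (dist : List ((Int × Int) × Int)) : Prop :=
  ∀ v m, dlook dist v = some m → ∃ l, W g s v l ∧ (l.length : Int) = m

lemma Lo_relax {g : List (Int × Int × List (Int × Int))} {s u v : Int × Int}
    {dist : List ((Int × Int) × Int)} {du : Int} (hLo : Lo g s dist)
    (hu : ∃ lu, W g s u lu ∧ (lu.length : Int) = du) (hv : v ∈ adjD g u) :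
    Lo g s (relax dist du v) := by
  obtain ⟨lu, hwu, hlu⟩ := hu
  have hnew : ∃ l, W g s v l ∧ (l.length : Int) = du + 1 := by
    refine ⟨lu ++ [v], W_append hwu (W.cons hv (W.nil v)), ?_⟩
    simp [← hlu]
  intro y m h
  unfold relax at h
  cases hdv : dlook dist v with
  | none =>
    rw [hdv] at h
    dsimp only at h
    by_cases hy : dlook dist y = none
    · rw [dlook_append_none hy] at h
      by_cases hyv : v = y
      · subst hyv
        simp [dlook] at h
        subst h
        exact hnew
      · simp [dlook, hyv] at h
    · obtain ⟨w, hw⟩ := Option.ne_none_iff_exists'.mp hy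
      rw [dlook_append_some hw] at h
      obtain rfl : w = m := by injection h
      exact hLo y _ hw
  | some dv =>
    rw [hdv] at h
    dsimp only at h
    by_cases hlt : du + 1 < dv
    · rw [if_pos hlt] at h
      by_cases hyv : y = v
      · subst hyv
        rw [dlook_dset_self hdv] at h
        obtain rfl : du + 1 = m := by injection h
        exact hnew
      · rw [dlook_dset_ne hyv] at h
        exact hLo y m h
    · rw [if_neg hlt] at h
      exact hLo y m h

lemma Lo_fold_relax {g : List (Int × Int × List (Int × Int))} {s u : Int × Int} {du : Int}
    (hu : ∃ lu, W g s u lu ∧ (lu.length : Int) = du) :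
    ∀ (ns' : List (Int × Int)), (∀ x ∈ ns', x ∈ adjD g u) →
      ∀ dist, Lo g s dist → Lo g s (ns'.foldl (fun d x => relax d du x) dist) := by
  intro ns'
  induction ns' with
  | nil => intro _ dist h; simpa using h
  | cons a t ih =>
    intro hns dist h
    rw [List.foldl_cons]
    exact ih (fun x hx => hns x (List.mem_cons_of_mem a hx)) _
      (Lo_relax h hu (hns a List.mem_cons_self))

lemma Lo_entry {g : List (Int × Int × List (Int × Int))} {s : Int × Int}
    {u : Int × Int} {ns : List (Int × Int)} (hmem : (u, ns) ∈ gitems g [])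
    {dist : List ((Int × Int) × Int)} (h : Lo g s dist) : Lo g s (entryFold dist u ns) := by
  unfold entryFold
  cases hdu : dlook dist u with
  | none => exact h
  | some du =>
    have hadj : ∀ x ∈ ns, x ∈ adjD g u := by
      intro x hx
      unfold adjD
      rw [gitems_glook.mp hmem]
      simpa using hx
    exact Lo_fold_relax (h u du hdu) ns hadj dist h

lemma Lo_round {g : List (Int × Int × List (Int × Int))} {s : Int × Int}
    {dist : List ((Int × Int) × Int)} (h : Lo g s dist) : Lo g s (bfRound g dist) := by
  unfold bfRound
  have : ∀ (L : List ((Int × Int) × List (Int × Int))), (∀ p ∈ L, p ∈ gitems g []) →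
      ∀ d, Lo g s d → Lo g s (L.foldl (fun d p => entryFold d p.1 p.2) d) := by
    intro L
    induction L with
    | nil => intro _ d h; simpa using h
    | cons p t ih =>
      intro hL d hd
      rw [List.foldl_cons]
      exact ih (fun q hq => hL q (List.mem_cons_of_mem p hq)) _
        (Lo_entry (by simpa using hL p List.mem_cons_self) hd)
  exact this (gitems g []) (fun p hp => hp) dist h

lemma Lo_bf (g : List (Int × Int × List (Int × Int))) (s : Int × Int) : Lo g s (bf g s) := by
  unfold bf
  have hinit : Lo g s [(s, 0)] := by
    intro v m h
    by_cases hv : s = v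
    · subst hv
      simp [dlook] at h
      exact ⟨[], W.nil s, by simp [← h]⟩
    · simp [dlook, hv] at h
  have : ∀ (n : Nat) (d : List ((Int × Int) × Int)), Lo g s d → Lo g s (bfIter g n d) := by
    intro n
    induction n with
    | zero => intro d h; simpa [bfIter] using h
    | succ n ih => intro d h; rw [bfIter]; exact ih _ (Lo_round h)
  exact this _ _ hinit

/-! Upper invariant: after k rounds every node within k steps has a value ≤ that walk. -/

def Hi (g : List (Int × Int × List (Int × Int))) (s : Int × Int) (k : Nat)
    (dist : List ((Int × Int) × Int)) : Prop :=
  ∀ v (l : List (Int × Int)), W g s v l → l.length ≤ k →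
    ∃ m, dlook dist v = some m ∧ m ≤ (l.length : Int)

lemma innerHits {du : Int} :
    ∀ (ns' : List (Int × Int)) (d : List ((Int × Int) × Int)) (v : Int × Int), v ∈ ns' →
      ∃ m, dlook (ns'.foldl (fun d x => relax d du x) d) v = some m ∧ m ≤ du + 1 := by
  intro ns'
  induction ns' with
  | nil => intro d v h; simp at h
  | cons a t ih =>
    intro d v hv
    rw [List.foldl_cons]
    rcases List.mem_cons.mp hv with hv | hv
    · subst hv
      have hstep : ∃ m0, dlook (relax d du v) v = some m0 ∧ m0 ≤ du + 1 := by
        unfold relax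
        cases hdv : dlook d v with
        | none =>
          refine ⟨du + 1, ?_, le_refl _⟩
          dsimp only
          rw [dlook_append_none hdv]
          simp [dlook]
        | some dv =>
          dsimp only
          by_cases hlt : du + 1 < dv
          · rw [if_pos hlt]
            exact ⟨du + 1, dlook_dset_self hdv, le_refl _⟩
          · rw [if_neg hlt]
            exact ⟨dv, hdv, le_of_not_gt hlt⟩
      obtain ⟨m0, hm0, hle0⟩ := hstep
      obtain ⟨m, hm, hle⟩ := DLe_foldl (fun d x => DLe_relax d du x) t (relax d du v) v m0 hm0
      exact ⟨m, hm, le_trans hle hle0⟩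
    · exact ih (relax d du a) v hv

lemma roundHits {g : List (Int × Int × List (Int × Int))} {u v : Int × Int}
    {ns : List (Int × Int)} {d : List ((Int × Int) × Int)} {mu : Int}
    (hmem : (u, ns) ∈ gitems g []) (hu : dlook d u = some mu) (hv : v ∈ ns) :
    ∃ m, dlook (bfRound g d) v = some m ∧ m ≤ mu + 1 := by
  obtain ⟨pre, suf, hps⟩ := List.append_of_mem hmem
  unfold bfRound
  rw [hps, List.foldl_append, List.foldl_cons]
  set d1 := pre.foldl (fun d p => entryFold d p.1 p.2) d with hd1
  obtain ⟨mu', hmu', hlemu⟩ := DLe_foldl (fun d p => DLe_entry d p.1 p.2) pre d u mu hu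
  rw [← hd1] at hmu'
  have : ∃ m1, dlook (entryFold d1 u ns) v = some m1 ∧ m1 ≤ mu' + 1 := by
    unfold entryFold
    rw [hmu']
    exact innerHits ns d1 v hv
  obtain ⟨m1, hm1, hle1⟩ := this
  obtain ⟨m, hm, hle⟩ := DLe_foldl (fun d p => DLe_entry d p.1 p.2) suf (entryFold d1 u ns) v m1 hm1
  exact ⟨m, hm, le_trans hle (by omega)⟩

lemma Hi_step {g : List (Int × Int × List (Int × Int))} {s : Int × Int} {k : Nat}
    {d : List ((Int × Int) × Int)} (h : Hi g s k d) : Hi g s (k + 1) (bfRound g d) := by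
  intro v l hw hlen
  rcases Nat.lt_or_ge l.length (k + 1) with hcase | hcase
  · obtain ⟨m, hm, hle⟩ := h v l hw (Nat.lt_succ_iff.mp hcase)
    obtain ⟨m', hm', hle'⟩ := DLe_round g d v m hm
    exact ⟨m', hm', le_trans hle' hle⟩
  · have hlenk : l.length = k + 1 := le_antisymm hlen hcase
    have hne : l ≠ [] := by intro hh; rw [hh] at hlenk; simp at hlenk
    have hdec := List.dropLast_concat_getLast hne
    rw [← hdec] at hw
    have hxv : l.getLast hne = v := W_last' hw
    rw [hxv] at hw
    obtain ⟨u, hsu, hux⟩ := W_split l.dropLast [v] s hw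
    obtain ⟨hadj, _⟩ := W_cons_inv hux
    have hglook : ∃ ns, glook g u = some ns ∧ v ∈ ns := by
      unfold adjD at hadj
      cases hg : glook g u with
      | none => rw [hg] at hadj; simp at hadj
      | some ns => rw [hg] at hadj; exact ⟨ns, rfl, by simpa using hadj⟩
    obtain ⟨ns, hg, hvns⟩ := hglook
    have hdllen : l.dropLast.length ≤ k := by
      have hds : l.dropLast.length = l.length - 1 := List.length_dropLast
      omega
    obtain ⟨mu, hmu, hmule⟩ := h u l.dropLast hsu hdllen
    obtain ⟨m, hm, hle⟩ := roundHits (gitems_glook.mpr hg) hmu hvns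
    refine ⟨m, hm, ?_⟩
    have h1 : (l.dropLast.length : Int) ≤ (k : Int) := by exact_mod_cast hdllen
    have h2 : ((l.length : Nat) : Int) = (k : Int) + 1 := by exact_mod_cast hlenk
    omega

lemma Hi_bf (g : List (Int × Int × List (Int × Int))) (s : Int × Int) :
    Hi g s ((gitems g []).length + ((gitems g []).map (fun p => p.2.length)).sum + 1) (bf g s) := by
  have hinit : Hi g s 0 [(s, 0)] := by
    intro v l hw hlen
    have : l = [] := List.eq_nil_of_length_eq_zero (Nat.le_zero.mp hlen)
    subst this
    obtain rfl : s = v := W_nil_inv hw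
    exact ⟨0, by simp [dlook], by simp⟩
  have hiter : ∀ (n : Nat) (k : Nat) (d : List ((Int × Int) × Int)),
      Hi g s k d → Hi g s (k + n) (bfIter g n d) := by
    intro n
    induction n with
    | zero => intro k d h; simpa [bfIter] using h
    | succ n ih =>
      intro k d h
      rw [bfIter]
      have := ih (k + 1) (bfRound g d) (Hi_step h)
      have harith : k + 1 + n = k + (n + 1) := by omega
      rwa [harith] at this
  unfold bf
  have := hiter ((gitems g []).length + ((gitems g []).map (fun p => p.2.length)).sum + 1) 0 [(s, 0)] hinit
  simpa using this

lemma nodup_len_bound {g : List (Int × Int × List (Int × Int))} {s v : Int × Int}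
    {l : List (Int × Int)} (hw : W g s v l) (hnd : (s :: l).Nodup) :
    l.length ≤ (gitems g []).length + ((gitems g []).map (fun p => p.2.length)).sum := by
  have hsub : ∀ x ∈ l, x ∈ flatVals g := W_mem_flat hw
  have hndl : l.Nodup := (List.nodup_cons.mp hnd).2
  have hsp : List.Subperm l (flatVals g) := List.Nodup.subperm hndl hsub
  have h1 : l.length ≤ (flatVals g).length := hsp.length_le
  have h2 : (flatVals g).length = ((gitems g []).map (fun p => p.2.length)).sum := by
    unfold flatVals
    rw [List.length_flatMap]
  omega

/-- B computes: a value exists iff a walk exists, and it is the minimum walk length. -/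
lemma bf_some_of_walk {g : List (Int × Int × List (Int × Int))} {s v : Int × Int}
    {l : List (Int × Int)} (hw : W g s v l) :
    ∃ m, dlook (bf g s) v = some m ∧ m ≤ (l.length : Int) := by
  obtain ⟨l', hw', hnd', hlen', _⟩ := W_cut l.length l (le_refl _) s hw
  have hbound := nodup_len_bound hw' hnd'
  obtain ⟨m, hm, hle⟩ := Hi_bf g s v l' hw' (by omega)
  refine ⟨m, hm, le_trans hle (by exact_mod_cast hlen')⟩

lemma bf_min {g : List (Int × Int × List (Int × Int))} {s v : Int × Int} {m : Int}
    (h : dlook (bf g s) v = some m) :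
    ∀ l, W g s v l → m ≤ (l.length : Int) := by
  intro l hw
  obtain ⟨m', hm', hle'⟩ := bf_some_of_walk hw
  rw [h] at hm'
  obtain rfl : m = m' := by injection hm'
  exact hle'


/-! A-side: characterization of the DFS as minimum-length duplicate-free walk. -/

def Cand (g : List (Int × Int × List (Int × Int))) (P : List (Int × Int))
    (s e : Int × Int) (l : List (Int × Int)) : Prop :=
  W g s e l ∧ (s :: l).Nodup ∧ ∀ x ∈ s :: l, x ∉ P

def FsSpec (g : List (Int × Int × List (Int × Int))) (P : List (Int × Int))
    (s e : Int × Int) (o : Option (List (Int × Int))) : Prop :=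
  (o = none → ∀ l, ¬ Cand g P s e l) ∧
  (∀ q, o = some q → ∃ l, Cand g P s e l ∧ q = P ++ s :: l ∧
    ∀ l', Cand g P s e l' → l.length ≤ l'.length)

def QAcc (g : List (Int × Int × List (Int × Int))) (P2 : List (Int × Int)) (e : Int × Int)
    (S : (Int × Int) → Prop) (o : Option (List (Int × Int))) : Prop :=
  (o = none → ∀ v, S v → ∀ t, ¬ Cand g P2 v e t) ∧
  (∀ q, o = some q →
    (∃ v, S v ∧ ∃ t, Cand g P2 v e t ∧ q = P2 ++ v :: t) ∧
    (∀ v, S v → ∀ t, Cand g P2 v e t → q.length ≤ P2.length + 1 + t.length))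

lemma QAcc_congr {g : List (Int × Int × List (Int × Int))} {P2 : List (Int × Int)}
    {e : Int × Int} {S S' : (Int × Int) → Prop} {o : Option (List (Int × Int))}
    (h : ∀ x, S x ↔ S' x) (hQ : QAcc g P2 e S o) : QAcc g P2 e S' o := by
  obtain ⟨h1, h2⟩ := hQ
  refine ⟨fun hn v hv t => h1 hn v ((h v).mpr hv) t, fun q hq => ?_⟩
  obtain ⟨⟨v, hv, t, hc, he⟩, hmin⟩ := h2 q hq
  exact ⟨⟨v, (h v).mp hv, t, hc, he⟩, fun v hv t hc => hmin v ((h v).mpr hv) t hc⟩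

lemma QAcc_extend_nocand {g : List (Int × Int × List (Int × Int))} {P2 : List (Int × Int)}
    {e v : Int × Int} {S : (Int × Int) → Prop} {o : Option (List (Int × Int))}
    (hQ : QAcc g P2 e S o) (hnoc : ∀ t, ¬ Cand g P2 v e t) :
    QAcc g P2 e (fun x => S x ∨ x = v) o := by
  obtain ⟨h1, h2⟩ := hQ
  refine ⟨?_, fun q hq => ?_⟩
  · rintro hn x (hx | rfl) t
    · exact h1 hn x hx t
    · exact hnoc t
  · obtain ⟨⟨v0, hv0, t0, hc0, he0⟩, hmin⟩ := h2 q hq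
    refine ⟨⟨v0, Or.inl hv0, t0, hc0, he0⟩, ?_⟩
    rintro x (hx | rfl) t hc
    · exact hmin x hx t hc
    · exact absurd hc (hnoc t)

lemma Cand_decompose {g : List (Int × Int × List (Int × Int))} {P : List (Int × Int)}
    {s e : Int × Int} (hs : s ∉ P) (hse : s ≠ e) {nbrs : List (Int × Int)}
    (hg : glook g s = some nbrs) (l : List (Int × Int)) :
    Cand g P s e l ↔ ∃ v t, l = v :: t ∧ v ∈ nbrs ∧ Cand g (P ++ [s]) v e t := by
  constructor
  · rintro ⟨hw, hnd, hav⟩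
    cases l with
    | nil => exact absurd (W_nil_inv hw) hse
    | cons v t =>
      obtain ⟨hadj, hwt⟩ := W_cons_inv hw
      have hvn : v ∈ nbrs := by
        unfold adjD at hadj
        rw [hg] at hadj
        simpa using hadj
      have hns : s ∉ v :: t := (List.nodup_cons.mp hnd).1
      refine ⟨v, t, rfl, hvn, hwt, (List.nodup_cons.mp hnd).2, ?_⟩
      intro x hx
      rw [List.mem_append]
      push Not
      refine ⟨hav x (List.mem_cons_of_mem s hx), ?_⟩
      simp only [List.mem_singleton]
      intro hxs
      subst hxs
      exact hns hx
  · rintro ⟨v, t, rfl, hvn, hwt, hnd, hav⟩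
    have hadj : v ∈ adjD g s := by
      unfold adjD
      rw [hg]
      simpa using hvn
    have hnsv : s ∉ v :: t := by
      intro hmem
      have := hav s hmem
      simp at this
    refine ⟨W.cons hadj hwt, List.nodup_cons.mpr ⟨hnsv, hnd⟩, ?_⟩
    intro x hx
    rcases List.mem_cons.mp hx with rfl | hx
    · exact hs
    · intro hxP
      exact hav x hx (by simp [hxP])

lemma loopChar (g : List (Int × Int × List (Int × Int))) (P2 : List (Int × Int)) (e : Int × Int)
    (IH : ∀ v, v ∈ valsOf g → v ∉ P2 → FsSpec g P2 v e (fs g v e P2)) :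
    ∀ (vs : List (Int × Int)) (hsub : ∀ x ∈ vs, x ∈ valsOf g)
      (acc : Option (List (Int × Int))) (S : (Int × Int) → Prop),
      QAcc g P2 e S acc → QAcc g P2 e (fun x => S x ∨ x ∈ vs) (fsLoop g e P2 vs acc hsub) := by
  intro vs
  induction vs with
  | nil =>
    intro hsub acc S hQ
    rw [fsLoop]
    exact QAcc_congr (by simp) hQ
  | cons v rest ih =>
    intro hsub acc S hQ
    have hrest : ∀ x ∈ rest, x ∈ valsOf g := fun x hx => hsub x (List.mem_cons_of_mem v hx)
    by_cases hv : v ∈ P2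
    · have heq : fsLoop g e P2 (v :: rest) acc hsub = fsLoop g e P2 rest acc hrest := by
        rw [fsLoop]
        simp [hv]
      rw [heq]
      have hnoc : ∀ t, ¬ Cand g P2 v e t := by
        rintro t ⟨_, _, hav⟩
        exact hav v (by simp) hv
      have := ih hrest acc _ (QAcc_extend_nocand hQ hnoc)
      exact QAcc_congr (by intro x; simp [List.mem_cons]; tauto) this
    · have hvv : v ∈ valsOf g := hsub v List.mem_cons_self
      have hspec := IH v hvv hv
      cases hq : fs g v e P2 with
      | none =>
        have heq : fsLoop g e P2 (v :: rest) acc hsub = fsLoop g e P2 rest acc hrest := by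
          rw [fsLoop]
          simp [hv, hq]
        rw [heq]
        have hnoc : ∀ t, ¬ Cand g P2 v e t := hspec.1 hq
        have := ih hrest acc _ (QAcc_extend_nocand hQ hnoc)
        exact QAcc_congr (by intro x; simp [List.mem_cons]; tauto) this
      | some q' =>
        obtain ⟨t, hcand, hqeq, hmin⟩ := hspec.2 q' hq
        have hq'len : q'.length = P2.length + 1 + t.length := by
          rw [hqeq]; simp; omega
        cases acc with
        | none =>
          have heq : fsLoop g e P2 (v :: rest) none hsub = fsLoop g e P2 rest (some q') hrest := by
            rw [fsLoop]
            simp [hv, hq]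
          rw [heq]
          have hQ' : QAcc g P2 e (fun x => S x ∨ x = v) (some q') := by
            refine ⟨fun hn => by simp at hn, fun q hqq => ?_⟩
            obtain rfl : q' = q := by injection hqq
            refine ⟨⟨v, Or.inr rfl, t, hcand, hqeq⟩, ?_⟩
            rintro x (hx | rfl) t' hc'
            · exact absurd hc' (hQ.1 rfl x hx t')
            · have := hmin t' hc'
              omega
          have := ih hrest (some q') _ hQ'
          exact QAcc_congr (by intro x; simp [List.mem_cons]; tauto) this
        | some a =>
          obtain ⟨⟨v0, hS0, t0, hc0, ha0⟩, hminS⟩ := hQ.2 a rfl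
          have ha0len : a.length = P2.length + 1 + t0.length := by
            rw [ha0]; simp; omega
          by_cases hlen : q'.length < a.length
          · have heq : fsLoop g e P2 (v :: rest) (some a) hsub = fsLoop g e P2 rest (some q') hrest := by
              rw [fsLoop]
              simp [hv, hq, hlen]
            rw [heq]
            have hQ' : QAcc g P2 e (fun x => S x ∨ x = v) (some q') := by
              refine ⟨fun hn => by simp at hn, fun q hqq => ?_⟩
              obtain rfl : q' = q := by injection hqq
              refine ⟨⟨v, Or.inr rfl, t, hcand, hqeq⟩, ?_⟩
              rintro x (hx | rfl) t' hc'
              · have := hminS x hx t' hc'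
                omega
              · have := hmin t' hc'
                omega
            have := ih hrest (some q') _ hQ'
            exact QAcc_congr (by intro x; simp [List.mem_cons]; tauto) this
          · have heq : fsLoop g e P2 (v :: rest) (some a) hsub = fsLoop g e P2 rest (some a) hrest := by
              rw [fsLoop]
              simp [hv, hq, hlen]
            rw [heq]
            have hQ' : QAcc g P2 e (fun x => S x ∨ x = v) (some a) := by
              refine ⟨fun hn => by simp at hn, fun q hqq => ?_⟩
              obtain rfl : a = q := by injection hqq
              refine ⟨⟨v0, Or.inl hS0, t0, hc0, ha0⟩, ?_⟩
              rintro x (hx | rfl) t' hc'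
              · exact hminS x hx t' hc'
              · have := hmin t' hc'
                omega
            have := ih hrest (some a) _ hQ'
            exact QAcc_congr (by intro x; simp [List.mem_cons]; tauto) this

lemma fsChar (g : List (Int × Int × List (Int × Int))) :
    ∀ (n : Nat) (P : List (Int × Int)) (s e : Int × Int),
      pmu g (P ++ [s]) ≤ n → s ∉ P → FsSpec g P s e (fs g s e P) := by
  intro n
  induction n using Nat.strong_induction_on with
  | _ n ih =>
  intro P s e hn hs
  by_cases hse : s = e
  · have heq : fs g s e P = some (P ++ [s]) := by rw [fs]; simp [hse]
    refine ⟨fun h => by rw [heq] at h; simp at h, fun q hq => ?_⟩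
    rw [heq] at hq
    obtain rfl : P ++ [s] = q := by injection hq
    subst hse
    exact ⟨[], ⟨W.nil s, by simp, by simpa using hs⟩, rfl, fun l' _ => Nat.zero_le _⟩
  · cases hg : glook g s with
    | none =>
      have heq : fs g s e P = none := by
        rw [fs, if_neg hse]
        split
        · rfl
        · next nbrs' hg' => rw [hg] at hg'; cases hg'
      refine ⟨fun _ l hc => ?_, fun q hq => by rw [heq] at hq; simp at hq⟩
      obtain ⟨hw, _, _⟩ := hc
      cases l with
      | nil => exact absurd (W_nil_inv hw) hse
      | cons v t =>
        have hadj := (W_cons_inv hw).1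
        unfold adjD at hadj
        rw [hg] at hadj
        simp at hadj
    | some nbrs =>
      have heq : fs g s e P = fsLoop g e (P ++ [s]) nbrs none
          (fun x hx => glook_sub g s nbrs hg x hx) := by
        rw [fs, if_neg hse]
        split
        · next hg' => rw [hg] at hg'; cases hg'
        · next nbrs' hg' =>
            rw [hg] at hg'
            obtain rfl : nbrs' = nbrs := by injection hg' with h; exact h.symm
            rfl
      have IH' : ∀ v, v ∈ valsOf g → v ∉ P ++ [s] →
          FsSpec g (P ++ [s]) v e (fs g v e (P ++ [s])) := by
        intro v hvv hvp
        have hlt : pmu g ((P ++ [s]) ++ [v]) < pmu g (P ++ [s]) := pmu_lt g (P ++ [s]) v hvv hvp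
        have hvp' : v ∉ P := fun hc => hvp (by simp [hc])
        exact ih (pmu g ((P ++ [s]) ++ [v])) (by omega) (P ++ [s]) v e (le_refl _) hvp
      have hQ0 : QAcc g (P ++ [s]) e (fun _ => False) none :=
        ⟨fun _ v hv t => hv.elim, fun q hq => by simp at hq⟩
      have hQ := loopChar g (P ++ [s]) e IH' nbrs
        (fun x hx => glook_sub g s nbrs hg x hx) none _ hQ0
      rw [heq]
      constructor
      · intro hnone l hc
        obtain ⟨v, t, rfl, hvn, hct⟩ := (Cand_decompose hs hse hg l).mp hc
        exact hQ.1 hnone v (Or.inr hvn) t hct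
      · intro q hq
        obtain ⟨⟨v, hv', t, hcand, hqeq⟩, hminQ⟩ := hQ.2 q hq
        have hvn : v ∈ nbrs := by tauto
        refine ⟨v :: t, (Cand_decompose hs hse hg (v :: t)).mpr ⟨v, t, rfl, hvn, hcand⟩, ?_, ?_⟩
        · rw [hqeq]; simp
        · intro l' hc'
          obtain ⟨v', t', rfl, hvn', hct'⟩ := (Cand_decompose hs hse hg l').mp hc'
          have hb := hminQ v' (Or.inr hvn') t' hct'
          have hql : q.length = (P ++ [s]).length + 1 + t.length := by
            rw [hqeq]; simp; omega
          simp only [List.length_cons]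
          omega

/-! Glue: the DFS result and the Bellman-Ford table agree. -/

lemma fs_top_spec (g : List (Int × Int × List (Int × Int))) (s e : Int × Int) :
    FsSpec g [] s e (fs g s e []) :=
  fsChar g (pmu g ([] ++ [s])) [] s e (le_refl _) (by simp)

lemma cand_nil_iff {g : List (Int × Int × List (Int × Int))} {s e : Int × Int}
    {l : List (Int × Int)} : Cand g [] s e l ↔ W g s e l ∧ (s :: l).Nodup := by
  unfold Cand
  simp

lemma walk_of_cand {g : List (Int × Int × List (Int × Int))} {s e : Int × Int}
    {l : List (Int × Int)} (h : Cand g [] s e l) : W g s e l := h.1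

lemma cand_of_walk {g : List (Int × Int × List (Int × Int))} {s e : Int × Int}
    {l : List (Int × Int)} (h : W g s e l) :
    ∃ l', Cand g [] s e l' ∧ l'.length ≤ l.length := by
  obtain ⟨l', hw', hnd', hlen', _⟩ := W_cut l.length l (le_refl _) s h
  exact ⟨l', cand_nil_iff.mpr ⟨hw', hnd'⟩, hlen'⟩

lemma fs_none_iff_dlook_none (g : List (Int × Int × List (Int × Int))) (s e : Int × Int) :
    fs g s e [] = none ↔ dlook (bf g s) e = none := by
  constructor
  · intro hfs
    cases hd : dlook (bf g s) e with
    | none => rfl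
    | some m =>
      obtain ⟨lm, hwlm, _⟩ := Lo_bf g s e m hd
      obtain ⟨l', hc', _⟩ := cand_of_walk hwlm
      exact absurd hc' ((fs_top_spec g s e).1 hfs l')
  · intro hd
    cases hfs : fs g s e [] with
    | none => rfl
    | some q =>
      obtain ⟨l, hc, _, _⟩ := (fs_top_spec g s e).2 q hfs
      obtain ⟨m, hm, _⟩ := bf_some_of_walk (walk_of_cand hc)
      rw [hd] at hm
      simp at hm

lemma fs_some_val (g : List (Int × Int × List (Int × Int))) (s e : Int × Int)
    {p : List (Int × Int)} {m : Int}
    (hp : fs g s e [] = some p) (hm : dlook (bf g s) e = some m) :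
    (p.length : Int) = m + 1 := by
  obtain ⟨l, hc, hpeq, hmin⟩ := (fs_top_spec g s e).2 p hp
  have hwl : W g s e l := walk_of_cand hc
  have hub : m ≤ (l.length : Int) := bf_min hm l hwl
  have hlb : (l.length : Int) ≤ m := by
    obtain ⟨lm, hwlm, hlenm⟩ := Lo_bf g s e m hm
    obtain ⟨l'', hc'', hlen''⟩ := cand_of_walk hwlm
    have h1 : l.length ≤ l''.length := hmin l'' hc''
    have h2 : (l''.length : Int) ≤ (lm.length : Int) := by exact_mod_cast hlen''
    omega
  have hlm : (l.length : Int) = m := le_antisymm hlb hub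
  have : p.length = l.length + 1 := by rw [hpeq]; simp
  rw [this]
  push_cast
  omega
-- ===== VERDICT (by name: the statement is the Claim_ definition above) =====
theorem build_portal_graph_spec : Claim_equal_build_portal_graph := by
  unfold Claim_equal_build_portal_graph
  intro graph portals_oi _
  unfold Spec_build_portal_graph
  unfold build_portal_graph build_portal_graph_alt
  have hstep : ∀ (pg : List (String × List (String × Int))) (sp : String × Int × Int),
      (portals_oi.foldl (fun inner ep =>
        if sp.1 = ep.1 then inner
        else if take2 sp.1 = take2 ep.1 then inner ++ [(ep.1, (0 : Int))]
        else
          match fs graph (sp.2.1, sp.2.2) (ep.2.1, ep.2.2) [] with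
          | none => inner
          | some p => inner ++ [(ep.1, (p.length : Int))]) [])
      = (portals_oi.foldl (fun inner ep =>
        if ep.1 = sp.1 then inner
        else if take2 sp.1 = take2 ep.1 then inner ++ [(ep.1, (0 : Int))]
        else
          match dlook (bf graph (sp.2.1, sp.2.2)) (ep.2.1, ep.2.2) with
          | none => inner
          | some m => inner ++ [(ep.1, m + 1)]) []) := by
    intro pg sp
    apply PySem.List.foldl_congr_mem
    intro inner ep _
    by_cases h1 : sp.1 = ep.1
    · simp [h1]
    · have h1' : ¬ ep.1 = sp.1 := fun hh => h1 hh.symm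
      rw [if_neg h1, if_neg h1']
      by_cases h2 : take2 sp.1 = take2 ep.1
      · rw [if_pos h2, if_pos h2]
      · rw [if_neg h2, if_neg h2]
        cases hfs : fs graph (sp.2.1, sp.2.2) (ep.2.1, ep.2.2) [] with
        | none =>
          rw [(fs_none_iff_dlook_none graph _ _).mp hfs]
        | some p =>
          cases hd : dlook (bf graph (sp.2.1, sp.2.2)) (ep.2.1, ep.2.2) with
          | none =>
            rw [← fs_none_iff_dlook_none graph _ _] at hd
            rw [hfs] at hd
            simp at hd
          | some m =>
            dsimp only
            rw [fs_some_val graph _ _ hfs hd]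
  apply PySem.List.foldl_congr_mem
  intro pg sp _
  rw [hstep pg sp]
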